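-- pv_equiv track=rewrite | github.com/DiveShack500/Senior-Capstone-Project | segmentation_masks.py | get_sliding_window_coords
-- ===== SOURCE A (Python) =====
-- def get_sliding_window_coords(img_h, img_w, patch_size, stride):
--     """
--     Compute all (y1, x1) top-left coordinates for a sliding window grid.
--     Ensures full coverage — last row/col adjusted to stay within bounds.
--
--     Returns: list of (y1, x1) tuples
--     """
--     coords = []
--     y = 0
--     while y + patch_size <= img_h:
--         x = 0
--         while x + patch_size <= img_w:
--             coords.append((y, x))
--             x += stride
--         # Final column — align to right edge
--         if x - stride + patch_size < img_w:
--             coords.append((y, img_w - patch_size))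
--         y += stride
--     # Final row — align to bottom edge
--     if y - stride + patch_size < img_h:
--         x = 0
--         while x + patch_size <= img_w:
--             coords.append((img_h - patch_size, x))
--             x += stride
--         if x - stride + patch_size < img_w:
--             coords.append((img_h - patch_size, img_w - patch_size))
--
--     return list(set(coords))  # deduplicate corner overlaps
-- ===== SOURCE B (Python) =====
-- def _axis_positions(limit, patch_size, stride):
--     """Top-left positions along one axis: 0, stride, 2*stride, ... plus an
--     edge-aligned final position when a gap remains."""
--     positions = []
--     p = 0
--     while p + patch_size <= limit:
--         positions.append(p)
--         p += stride
--     if p - stride + patch_size < limit: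
--         positions.append(limit - patch_size)
--     return positions
--
--
-- def get_sliding_window_coords(img_h, img_w, patch_size, stride):
--     ys = _axis_positions(img_h, patch_size, stride)
--     if not ys:
--         return []  # no valid rows: nothing to enumerate
--     xs = _axis_positions(img_w, patch_size, stride)
--     return list(set((y, x) for y in ys for x in xs))
-- ===== Notes on version B (the rewrite author's own statement) =====
-- stated objective: simpler
-- what changed: B factors the 2-D nested scan into two independent 1-D axis-position lists (rows and columns share one helper) and forms their Cartesian product, instead of re-running the inner x-loop and its right-edge fixup for every row and once more for the bottom-edge row.
import Mathlib
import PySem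

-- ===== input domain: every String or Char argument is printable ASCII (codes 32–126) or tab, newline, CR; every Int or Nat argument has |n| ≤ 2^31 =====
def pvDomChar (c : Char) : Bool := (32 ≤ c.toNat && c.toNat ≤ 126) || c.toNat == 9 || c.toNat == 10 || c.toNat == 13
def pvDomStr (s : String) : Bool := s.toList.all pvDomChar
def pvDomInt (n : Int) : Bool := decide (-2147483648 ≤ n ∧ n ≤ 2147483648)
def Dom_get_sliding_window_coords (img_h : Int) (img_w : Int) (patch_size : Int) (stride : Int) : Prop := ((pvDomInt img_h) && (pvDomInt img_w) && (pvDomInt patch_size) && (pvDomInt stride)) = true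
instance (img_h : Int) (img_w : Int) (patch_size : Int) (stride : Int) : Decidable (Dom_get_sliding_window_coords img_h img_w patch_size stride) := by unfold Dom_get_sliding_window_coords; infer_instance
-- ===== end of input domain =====

-- B factors the 2-D sliding-window enumeration into two 1-D axis-position lists and takes their
-- product (objective: simpler); equivalence is about the returned list (no mutation involved).

-- ===== PORT A =====
-- inner 'while x + patch_size <= img_w' loop; returns (coords so far, final x).
-- The '0 < stride' guard only makes the port total: Python diverges there (the Python diverges there).
def pvAXLoop (img_w patch_size stride y x : Int) (acc : List (Int × Int)) : List (Int × Int) × Int :=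
  if _h : x + patch_size ≤ img_w ∧ 0 < stride then
    pvAXLoop img_w patch_size stride y (x + stride) (acc ++ [(y, x)])
  else (acc, x)
termination_by (img_w + 1 - patch_size - x).toNat
decreasing_by omega

-- outer 'while y + patch_size <= img_h' loop; returns (coords so far, final y).
def pvAYLoop (img_h img_w patch_size stride y : Int) (acc : List (Int × Int)) : List (Int × Int) × Int :=
  if _h : y + patch_size ≤ img_h ∧ 0 < stride then
    let r := pvAXLoop img_w patch_size stride y 0 acc
    let acc' := if r.2 - stride + patch_size < img_w then r.1 ++ [(y, img_w - patch_size)] else r.1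
    pvAYLoop img_h img_w patch_size stride (y + stride) acc'
  else (acc, y)
termination_by (img_h + 1 - patch_size - y).toNat
decreasing_by omega

def get_sliding_window_coords (img_h : Int) (img_w : Int) (patch_size : Int) (stride : Int) : List (Int × Int) :=
  let m := pvAYLoop img_h img_w patch_size stride 0 []
  let coords :=
    if m.2 - stride + patch_size < img_h then
      let r := pvAXLoop img_w patch_size stride (img_h - patch_size) 0 m.1
      if r.2 - stride + patch_size < img_w then r.1 ++ [(img_h - patch_size, img_w - patch_size)] else r.1
    else m.1
  PySem.Set.ofList coords  -- list(set(coords))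

-- ===== PORT B =====
-- _axis_positions: the 'while p + patch_size <= limit' loop; returns (positions, final p).
def pvBAxisLoop (limit patch_size stride p : Int) (acc : List Int) : List Int × Int :=
  if _h : p + patch_size ≤ limit ∧ 0 < stride then
    pvBAxisLoop limit patch_size stride (p + stride) (acc ++ [p])
  else (acc, p)
termination_by (limit + 1 - patch_size - p).toNat
decreasing_by omega

def pvBAxis (limit patch_size stride : Int) : List Int :=
  let r := pvBAxisLoop limit patch_size stride 0 []
  if r.2 - stride + patch_size < limit then r.1 ++ [limit - patch_size] else r.1

def get_sliding_window_coords_alt (img_h : Int) (img_w : Int) (patch_size : Int) (stride : Int) : List (Int × Int) :=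
  let ys := pvBAxis img_h patch_size stride
  if ys = [] then []
  else
    let xs := pvBAxis img_w patch_size stride
    PySem.Set.ofList (ys.flatMap fun y => xs.map fun x => (y, x))

-- ===== PRECONDITION & SPEC =====
def Spec_get_sliding_window_coords (img_h : Int) (img_w : Int) (patch_size : Int) (stride : Int) (out : List (Int × Int)) : Prop := out = get_sliding_window_coords_alt img_h img_w patch_size stride
instance (img_h : Int) (img_w : Int) (patch_size : Int) (stride : Int) (out : List (Int × Int)) : Decidable (Spec_get_sliding_window_coords img_h img_w patch_size stride out) := by unfold Spec_get_sliding_window_coords; infer_instance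

-- ===== CLAIM (what is proved, stated in full; the proofs are below) =====
def Claim_equal_get_sliding_window_coords : Prop := ∀ (img_h : Int) (img_w : Int) (patch_size : Int) (stride : Int), Dom_get_sliding_window_coords img_h img_w patch_size stride → Spec_get_sliding_window_coords img_h img_w patch_size stride (get_sliding_window_coords img_h img_w patch_size stride)

-- ===== LEMMAS AND PROOFS =====

-- pure (accumulator-free) description of one axis, used only by the proofs
def pvAxisList (limit patch_size stride p : Int) : List Int :=
  if _h : p + patch_size ≤ limit ∧ 0 < stride then
    p :: pvAxisList limit patch_size stride (p + stride)
  else []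
termination_by (limit + 1 - patch_size - p).toNat
decreasing_by omega

def pvAxisFinal (limit patch_size stride p : Int) : Int :=
  if _h : p + patch_size ≤ limit ∧ 0 < stride then
    pvAxisFinal limit patch_size stride (p + stride)
  else p
termination_by (limit + 1 - patch_size - p).toNat
decreasing_by omega

theorem pvBAxisLoop_eq (limit patch_size stride p : Int) (acc : List Int) :
    pvBAxisLoop limit patch_size stride p acc =
      (acc ++ pvAxisList limit patch_size stride p, pvAxisFinal limit patch_size stride p) := by
  induction p, acc using pvBAxisLoop.induct limit patch_size stride with
  | case1 p acc h ih =>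
    rw [pvBAxisLoop, pvAxisList, pvAxisFinal]
    simp [h, ih]
  | case2 p acc h =>
    rw [pvBAxisLoop, pvAxisList, pvAxisFinal]
    simp [h]

theorem pvBAxis_eq (limit patch_size stride : Int) :
    pvBAxis limit patch_size stride =
      (if pvAxisFinal limit patch_size stride 0 - stride + patch_size < limit then
        pvAxisList limit patch_size stride 0 ++ [limit - patch_size]
      else pvAxisList limit patch_size stride 0) := by
  rw [pvBAxis, pvBAxisLoop_eq]
  simp

theorem pvAXLoop_eq (img_w patch_size stride y x : Int) (acc : List (Int × Int)) :
    pvAXLoop img_w patch_size stride y x acc =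
      (acc ++ (pvAxisList img_w patch_size stride x).map (fun t => (y, t)),
       pvAxisFinal img_w patch_size stride x) := by
  induction x, acc using pvAXLoop.induct img_w patch_size stride y with
  | case1 x acc h ih =>
    rw [pvAXLoop, pvAxisList, pvAxisFinal]
    simp [h, ih]
  | case2 x acc h =>
    rw [pvAXLoop, pvAxisList, pvAxisFinal]
    simp [h]

theorem pvAYLoop_eq (img_h img_w patch_size stride y : Int) (acc : List (Int × Int)) :
    pvAYLoop img_h img_w patch_size stride y acc =
      (acc ++ (pvAxisList img_h patch_size stride y).flatMap
         (fun y' => (pvBAxis img_w patch_size stride).map (fun t => (y', t))),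
       pvAxisFinal img_h patch_size stride y) := by
  induction y, acc using pvAYLoop.induct img_h img_w patch_size stride with
  | case1 y acc h r acc' ih =>
    rw [pvAYLoop, pvAxisList, pvAxisFinal]
    simp only [h, and_self, dite_eq_ite]
    simp only [acc', r, dite_eq_ite] at ih
    rw [pvAXLoop_eq] at ih ⊢
    rw [ih, pvBAxis_eq img_w]
    split_ifs with hc <;> simp
  | case2 y acc h =>
    rw [pvAYLoop, pvAxisList, pvAxisFinal]
    simp [h]

-- ===== VERDICT (by name: the statement is the Claim_ definition above) =====
theorem get_sliding_window_coords_spec : Claim_equal_get_sliding_window_coords := by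
  intro img_h img_w patch_size stride _
  unfold Spec_get_sliding_window_coords get_sliding_window_coords get_sliding_window_coords_alt
  simp only [pvAYLoop_eq, List.nil_append, pvAXLoop_eq]
  rw [pvBAxis_eq img_h, pvBAxis_eq img_w]
  split_ifs with h1 h2 h3 <;>
    simp_all [List.flatMap_append]
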